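-- pv_equiv track=rewrite | github.com/pypi-data/pypi-mirror-359 | packages/git-wiki-builder/git_wiki_builder-0.1.4-py3-none-any.whl/git_wiki_builder/validator.py | _fix_heading_spacing
-- ===== SOURCE A (Python) =====
-- from typing import List
--
-- def _fix_heading_spacing(content: str) -> str:
--     """Fix heading spacing issues (MD022)."""
--     lines = content.split("\n")
--     fixed_lines: List[str] = []
--
--     for i, line in enumerate(lines):
--         if line.strip().startswith("#"):
--             # Add blank line before heading if needed
--             if (
--                 i > 0
--                 and lines[i - 1].strip()
--                 and not fixed_lines[-1] == ""
--             ):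
--                 fixed_lines.append("")
--
--             fixed_lines.append(line)
--
--             # Add blank line after heading if needed
--             if (
--                 i < len(lines) - 1
--                 and lines[i + 1].strip()
--                 and not lines[i + 1].strip().startswith("#")
--             ):
--                 fixed_lines.append("")
--         else:
--             fixed_lines.append(line)
--
--     return "\n".join(fixed_lines)
-- ===== SOURCE B (Python) =====
-- def _fix_heading_spacing(content: str) -> str:
--     """Fix heading spacing issues (MD022)."""
--     out = []
--     prev = None
--     last_blank = False
--     for line in content.split("\n"):
--         if line.strip().startswith("#"):
--             if prev is not None and prev.strip() and not last_blank:
--                 out.append("")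
--             out.append(line)
--         else:
--             if (prev is not None and prev.strip().startswith("#")
--                     and line.strip() and not last_blank):
--                 out.append("")
--             out.append(line)
--         last_blank = line == ""
--         prev = line
--     return "\n".join(out)
-- ===== Notes on version B (the rewrite author's own statement) =====
-- stated objective: simpler
-- what changed: Replaces A's index-based loop that looks at lines[i-1], lines[i+1] and fixed_lines[-1] with a single forward pass carrying only the previous line and a last-appended-blank flag, deferring the blank-after-heading insertion to the next iteration.
import Mathlib
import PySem

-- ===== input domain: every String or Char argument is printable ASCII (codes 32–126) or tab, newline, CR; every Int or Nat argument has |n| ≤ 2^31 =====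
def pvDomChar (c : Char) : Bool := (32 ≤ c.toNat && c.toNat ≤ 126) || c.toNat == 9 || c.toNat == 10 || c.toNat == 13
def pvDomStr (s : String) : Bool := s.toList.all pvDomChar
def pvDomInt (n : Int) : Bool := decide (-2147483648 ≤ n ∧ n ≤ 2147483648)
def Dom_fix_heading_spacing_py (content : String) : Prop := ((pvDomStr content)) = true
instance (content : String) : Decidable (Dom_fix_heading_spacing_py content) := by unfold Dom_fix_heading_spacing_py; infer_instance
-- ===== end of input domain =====

-- B replaces A's index-based loop with lookahead (lines[i-1], lines[i+1], fixed_lines[-1])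
-- by a single state-carrying pass (previous line + last-appended-blank flag); same output, simpler decomposition.

-- line.strip().startswith("#")  (both Pythons use this test verbatim)
def pvIsHead (s : String) : Bool := PySem.Str.startswith (PySem.Str.strip s) "#"
-- truthiness of line.strip()
def pvNonblank (s : String) : Bool := PySem.Str.strip s != ""
-- content.split("\n")  ('\n' ≠ "', so split? is always some)
def pvSplitNL (content : String) : List String := (PySem.Str.split? content "\n").getD []

-- ===== PORT A =====
-- A's after-heading test: 'i < len(lines)-1 and lines[i+1].strip() and not lines[i+1].strip().startswith("#")';
-- the next line lines[i+1] (or its absence at i = len-1) is passed as an Option.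
def pvAfterOk (h : Option String) : Bool :=
  match h with
  | some t => pvNonblank t && !pvIsHead t
  | none => false

-- A's loop: index i becomes recursion on the remaining lines; 'i > 0' and 'lines[i-1]' are the
-- carried option 'prev'; 'lines[i+1]' is r.head?; fixed_lines[-1] is acc.getLast?.
def fixA_go (l : List String) (acc : List String) (prev : Option String) : List String :=
  match l with
  | [] => acc
  | c :: r =>
    if pvIsHead c then
      let acc1 := if (match prev with | some p => pvNonblank p | none => false)
                     && !(acc.getLast? == some "") then acc ++ [""] else acc
      let acc2 := acc1 ++ [c]
      let acc3 := if pvAfterOk r.head? then acc2 ++ [""] else acc2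
      fixA_go r acc3 (some c)
    else
      fixA_go r (acc ++ [c]) (some c)

def fix_heading_spacing_py (content : String) : String :=
  PySem.Str.join "\n" (fixA_go (pvSplitNL content) [] none)

-- ===== PORT B =====
def fixB_go (l : List String) (out : List String) (prev : Option String) (lastBlank : Bool) :
    List String :=
  match l with
  | [] => out
  | c :: r =>
    let out1 :=
      if pvIsHead c then
        (if (match prev with | some p => pvNonblank p | none => false) && !lastBlank
         then out ++ [""] else out) ++ [c]
      else
        (if (match prev with | some p => pvIsHead p | none => false)
            && pvNonblank c && !lastBlank
         then out ++ [""] else out) ++ [c]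
    fixB_go r out1 (some c) (c == "")

def fix_heading_spacing_py_alt (content : String) : String :=
  PySem.Str.join "\n" (fixB_go (pvSplitNL content) [] none false)

-- ===== PRECONDITION & SPEC =====
def Spec_fix_heading_spacing_py (content : String) (out : String) : Prop := out = fix_heading_spacing_py_alt content
instance (content : String) (out : String) : Decidable (Spec_fix_heading_spacing_py content out) := by unfold Spec_fix_heading_spacing_py; infer_instance

-- ===== CLAIM (what is proved, stated in full; the proofs are below) =====
def Claim_equal_fix_heading_spacing_py : Prop := ∀ (content : String), Dom_fix_heading_spacing_py content → Spec_fix_heading_spacing_py content (fix_heading_spacing_py content)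

-- ===== LEMMAS AND PROOFS =====
set_option maxHeartbeats 1000000

-- the blank line A has already appended AFTER a heading p, as a function of the NEXT original line
def pvPend (p : String) (h : Option String) : List String :=
  if pvIsHead p && pvAfterOk h then [""] else []

theorem pvIsHead_beq_empty {p : String} (h : pvIsHead p = true) : (p == "") = false := by
  by_cases hp : p = ""
  · subst hp; exact absurd h (by decide)
  · simp [hp]

theorem pvNonblank_beq_empty {p : String} (h : pvNonblank p = true) : (p == "") = false := by
  by_cases hp : p = ""
  · subst hp; exact absurd h (by decide)
  · simp [hp]

-- invariant: B's output lags A's accumulator by exactly the pending after-heading blank;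
-- the last appended line is the previous original line p, and lastBlank = (p == "").
theorem fix_key : ∀ (l out : List String) (p : String),
    fixA_go l ((out ++ [p]) ++ pvPend p l.head?) (some p)
      = fixB_go l (out ++ [p]) (some p) (p == "") := by
  intro l
  induction l with
  | nil => intro out p; simp [fixA_go, fixB_go, pvPend, pvAfterOk]
  | cons c r ih =>
    intro out p
    by_cases hc : pvIsHead c = true
    · have hpend : pvPend p (some c) = [] := by simp [pvPend, pvAfterOk, hc]
      by_cases hp : pvNonblank p = true
      · have hpe := pvNonblank_beq_empty hp
        by_cases ha : pvAfterOk r.head? = true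
        · have h2 := ih ((out ++ [p]) ++ [""]) c
          simp only [pvPend, hc, ha, Bool.true_and, if_true] at h2
          simp [fixA_go, fixB_go, hc, hp, hpe, ha, hpend]
          simpa using h2
        · have h2 := ih ((out ++ [p]) ++ [""]) c
          simp only [pvPend, hc, ha, Bool.true_and, if_false, List.append_nil,
            Bool.false_eq_true] at h2
          simp [fixA_go, fixB_go, hc, hp, hpe, ha, hpend]
          simpa using h2
      · by_cases ha : pvAfterOk r.head? = true
        · have h2 := ih (out ++ [p]) c
          simp only [pvPend, hc, ha, Bool.true_and, if_true] at h2
          simp [fixA_go, fixB_go, hc, hp, ha, hpend]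
          simpa using h2
        · have h2 := ih (out ++ [p]) c
          simp only [pvPend, hc, ha, Bool.true_and, if_false, List.append_nil,
            Bool.false_eq_true] at h2
          simp [fixA_go, fixB_go, hc, hp, ha, hpend]
          simpa using h2
    · have hc' : pvIsHead c = false := eq_false_of_ne_true hc
      by_cases hd : (pvIsHead p && pvNonblank c) = true
      · have hph : pvIsHead p = true := (Bool.and_eq_true_iff.mp hd).1
        have hcb : pvNonblank c = true := (Bool.and_eq_true_iff.mp hd).2
        have hpe := pvIsHead_beq_empty hph
        have hpendc : pvPend p (some c) = [""] := by
          simp [pvPend, pvAfterOk, hc', hph, hcb]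
        have h2 := ih ((out ++ [p]) ++ [""]) c
        simp only [pvPend, hc', Bool.false_and, if_false, List.append_nil,
          Bool.false_eq_true] at h2
        simp [fixA_go, fixB_go, hc', hpendc, hph, hcb, hpe]
        simpa using h2
      · have hd' : (pvIsHead p && pvNonblank c) = false := eq_false_of_ne_true hd
        have hpendc : pvPend p (some c) = [] := by
          simp [pvPend, pvAfterOk, hc', Bool.and_true]
          intro h1
          simpa [h1] using hd'
        have h2 := ih (out ++ [p]) c
        simp only [pvPend, hc', Bool.false_and, if_false, List.append_nil,
          Bool.false_eq_true] at h2
        simp [fixA_go, fixB_go, hc', hpendc, hd']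
        simpa using h2

theorem fix_go_eq (l : List String) : fixA_go l [] none = fixB_go l [] none false := by
  cases l with
  | nil => rfl
  | cons c r =>
    have h2 := fix_key r [] c
    by_cases hc : pvIsHead c = true
    · by_cases ha : pvAfterOk r.head? = true
      · simp only [pvPend, hc, ha, Bool.true_and, if_true] at h2
        simp [fixA_go, fixB_go, hc, ha]
        simpa using h2
      · simp only [pvPend, hc, ha, Bool.true_and, if_false, List.append_nil,
          Bool.false_eq_true] at h2
        simp [fixA_go, fixB_go, hc, ha]
        simpa using h2
    · have hc' : pvIsHead c = false := eq_false_of_ne_true hc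
      simp only [pvPend, hc', Bool.false_and, if_false, List.append_nil,
        Bool.false_eq_true] at h2
      simp [fixA_go, fixB_go, hc']
      simpa using h2

-- ===== VERDICT (by name: the statement is the Claim_ definition above) =====
theorem fix_heading_spacing_py_spec : Claim_equal_fix_heading_spacing_py := by
  intro content _
  unfold Spec_fix_heading_spacing_py fix_heading_spacing_py fix_heading_spacing_py_alt
  rw [fix_go_eq]
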